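-- pv_equiv track=rewrite | github.com/nuuuwan/lk_tourism_2025 | src/lk_tourism/seasons/TourismSeasonsClusterCoreMixin.py | _countries_by_cluster
-- ===== SOURCE A (Python) =====
-- def _countries_by_cluster(countries, assignments, k):
--     return {
--         cluster_index: sorted(
--             country
--             for country in countries
--             if assignments.get(country) == cluster_index
--         )
--         for cluster_index in range(k)
--     }
-- ===== SOURCE B (Python) =====
-- def _countries_by_cluster(countries, assignments, k):
--     groups = {i: [] for i in range(k)}
--     for country in countries:
--         c = assignments.get(country)
--         if c in groups:
--             groups[c].append(country)
--     return {i: sorted(g) for i, g in groups.items()}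
-- ===== Notes on version B (the rewrite author's own statement) =====
-- stated objective: faster
-- what changed: replaces the k full scans of countries (one filtered pass per cluster index) by a single pass that groups countries into a pre-initialised dict keyed by their assignment, then sorts each group
import Mathlib
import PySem

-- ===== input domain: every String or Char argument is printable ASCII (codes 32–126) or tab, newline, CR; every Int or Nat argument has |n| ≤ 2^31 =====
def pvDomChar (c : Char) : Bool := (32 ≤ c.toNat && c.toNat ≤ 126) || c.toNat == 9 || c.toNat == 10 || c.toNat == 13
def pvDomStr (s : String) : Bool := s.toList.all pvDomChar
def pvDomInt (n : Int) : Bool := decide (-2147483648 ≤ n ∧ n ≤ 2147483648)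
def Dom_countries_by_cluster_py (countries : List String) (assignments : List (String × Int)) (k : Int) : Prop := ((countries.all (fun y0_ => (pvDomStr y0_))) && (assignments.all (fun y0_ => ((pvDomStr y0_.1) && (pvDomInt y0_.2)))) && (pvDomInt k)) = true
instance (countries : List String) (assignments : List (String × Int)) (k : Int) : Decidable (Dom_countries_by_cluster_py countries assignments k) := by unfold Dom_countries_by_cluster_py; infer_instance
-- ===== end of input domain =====

-- B replaces A's k filtered scans of countries by one grouping pass into a dict, then sorts each group (faster).

-- ===== PORT A =====
-- dict comprehension over range(k); each value is sorted(country for country in countries if assignments.get(country) == cluster_index)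
def countries_by_cluster_py (countries : List String) (assignments : List (String × Int)) (k : Int) : List (Int × List String) :=
  (PySem.List.pyRange 0 k 1).map (fun clusterIndex =>
    (clusterIndex,
      PySem.List.sorted
        (countries.filter (fun country => (PySem.Dict.mk assignments).get? country == some clusterIndex))
        (fun s => s) false))

-- ===== PORT B =====
-- one step of B's grouping loop: c = assignments.get(country); if c in groups: groups[c].append(country)
def pvStepB (assignments : List (String × Int)) (groups : PySem.Dict Int (List String)) (country : String) : PySem.Dict Int (List String) :=
  match (PySem.Dict.mk assignments).get? country with
  | some c => if groups.contains c then groups.modify c [] (· ++ [country]) else groups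
  | none => groups

def countries_by_cluster_py_alt (countries : List String) (assignments : List (String × Int)) (k : Int) : List (Int × List String) :=
  let groups0 := (PySem.List.pyRange 0 k 1).foldl (fun d i => d.insert i []) PySem.Dict.empty
  let groups := countries.foldl (pvStepB assignments) groups0
  groups.items.map (fun p => (p.1, PySem.List.sorted p.2 (fun s => s) false))

-- ===== PRECONDITION & SPEC =====
def Spec_countries_by_cluster_py (countries : List String) (assignments : List (String × Int)) (k : Int) (out : List (Int × List String)) : Prop := out = countries_by_cluster_py_alt countries assignments k
instance (countries : List String) (assignments : List (String × Int)) (k : Int) (out : List (Int × List String)) : Decidable (Spec_countries_by_cluster_py countries assignments k out) := by unfold Spec_countries_by_cluster_py; infer_instance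

-- ===== CLAIM (what is proved, stated in full; the proofs are below) =====
def Claim_equal_countries_by_cluster_py : Prop := ∀ (countries : List String) (assignments : List (String × Int)) (k : Int), Dom_countries_by_cluster_py countries assignments k → Spec_countries_by_cluster_py countries assignments k (countries_by_cluster_py countries assignments k)

-- ===== LEMMAS AND PROOFS =====

-- the init fold produces exactly the items (i, []) for i in range(k)
lemma pvInitItems (k : Int) :
    ((PySem.List.pyRange 0 k 1).foldl (fun (d : PySem.Dict Int (List String)) i => d.insert i []) PySem.Dict.empty).items
      = (PySem.List.pyRange 0 k 1).map (fun i => (i, ([] : List String))) := by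
  have h := PySem.Dict.items_foldl_insert_fresh (l := PySem.List.pyRange 0 k 1)
      (k := fun i => i) (v := fun _ => ([] : List String)) (d := (PySem.Dict.empty : PySem.Dict Int (List String)))
      (by intro a _; simp [pysem]) (by simpa using PySem.List.nodup_pyRange_one 0 k)
  simpa using h

lemma pvInitKeys (k : Int) :
    ((PySem.List.pyRange 0 k 1).foldl (fun (d : PySem.Dict Int (List String)) i => d.insert i []) PySem.Dict.empty).keys
      = PySem.List.pyRange 0 k 1 := by
  simp only [PySem.Dict.keys, pvInitItems]
  simp [Function.comp_def]

-- B's grouping loop never adds or removes keys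
lemma pvStepB_keys (assignments : List (String × Int)) (d : PySem.Dict Int (List String)) (c : String) :
    (pvStepB assignments d c).keys = d.keys := by
  unfold pvStepB
  cases h : (PySem.Dict.mk assignments).get? c with
  | none => rfl
  | some j =>
    simp only []
    by_cases hc : d.contains j = true
    · rw [if_pos hc]
      simp [PySem.Dict.modify, PySem.Dict.keys_insert_of_contains, hc]
    · rw [if_neg hc]

lemma pvFoldB_keys (assignments : List (String × Int)) (cs : List String) (d : PySem.Dict Int (List String)) :
    (cs.foldl (pvStepB assignments) d).keys = d.keys := by
  induction cs generalizing d with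
  | nil => rfl
  | cons c cs ih => simp [List.foldl, ih, pvStepB_keys]

-- the grouping-loop invariant: the value at a present key i accumulates exactly the filtered countries
lemma pvFoldB_getD (assignments : List (String × Int)) (cs : List String)
    (d : PySem.Dict Int (List String)) (i : Int) (hi : d.contains i = true) :
    (cs.foldl (pvStepB assignments) d).getD i []
      = d.getD i [] ++ cs.filter (fun c => (PySem.Dict.mk assignments).get? c == some i) := by
  induction cs generalizing d with
  | nil => simp
  | cons c cs ih =>
    have hkeys : (pvStepB assignments d c).contains i = true := by
      have := pvStepB_keys assignments d c
      rw [PySem.Dict.contains_iff_mem_keys] at hi ⊢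
      rw [this]; exact hi
    rw [List.foldl_cons, ih _ hkeys, List.filter_cons]
    cases h : (PySem.Dict.mk assignments).get? c with
    | none => simp [pvStepB, h]
    | some j =>
      simp only [pvStepB, h]
      by_cases hj : j = i
      · subst hj
        rw [if_pos hi, PySem.Dict.getD_modify_self]
        simp
      · by_cases hc : d.contains j = true
        · rw [if_pos hc, PySem.Dict.getD_modify_of_ne]
          · have hne : ((some j == some i) = false) := by simp [hj]
            simp [hne]
          · exact fun he => hj he.symm
        · rw [if_neg hc]
          have hne : ((some j == some i) = false) := by simp [hj]
          simp [hne]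

-- ===== VERDICT (by name: the statement is the Claim_ definition above) =====
theorem countries_by_cluster_py_spec : Claim_equal_countries_by_cluster_py := by
  intro countries assignments k _
  unfold Spec_countries_by_cluster_py countries_by_cluster_py countries_by_cluster_py_alt
  simp only []
  set groups0 := (PySem.List.pyRange 0 k 1).foldl (fun (d : PySem.Dict Int (List String)) i => d.insert i []) PySem.Dict.empty with hg0
  set groups := countries.foldl (pvStepB assignments) groups0 with hg
  have hkeys : groups.keys = PySem.List.pyRange 0 k 1 := by
    rw [hg, pvFoldB_keys, hg0, pvInitKeys]
  have hnd : groups.keys.Nodup := by rw [hkeys]; exact PySem.List.nodup_pyRange_one 0 k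
  have hitems : groups.items = groups.keys.map (fun i => (i, groups.getD i [])) :=
    PySem.Dict.items_eq_map_keys groups hnd []
  rw [hitems, hkeys, List.map_map]
  apply List.map_congr_left
  intro i hi
  have hcontains : groups0.contains i = true := by
    rw [PySem.Dict.contains_iff_mem_keys, hg0, pvInitKeys]; exact hi
  have hgetD0 : groups0.getD i [] = [] := by
    have hmem : (i, ([] : List String)) ∈ groups0.items := by
      rw [hg0, pvInitItems]
      exact List.mem_map_of_mem hi
    exact PySem.Dict.getD_of_mem_items _ hmem (by rw [hg0, pvInitKeys]; exact PySem.List.nodup_pyRange_one 0 k) []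
  have hval := pvFoldB_getD assignments countries groups0 i hcontains
  rw [hgetD0] at hval
  simp only [List.nil_append] at hval
  simp only [Function.comp_def]
  rw [hg, hval]
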